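-- pv_equiv track=rewrite | github.com/ray-project/ray | python/ray/anyscale/data/datasource/snowflake_datasink.py | _resolve_object_name
-- ===== SOURCE A (Python) =====
-- from typing import Any, Dict, Iterable, Optional, Tuple
--
-- def _resolve_object_name(name) -> Tuple[Optional[str], Optional[str], str]:
--     num_dots = sum(c == "." for c in name)
--     if num_dots == 0:
--         database = None
--         schema = None
--         table = name
--     elif num_dots == 1:
--         database = None
--         schema, table = name.split(".")
--     elif num_dots == 2:
--         database, schema, table = name.split(".")
--     else:
--         raise ValueError(
--             "Expected schema object name to contain at most two dots ('.'),"
--             f"but got {num_dots}. Check that the provided name is valid. To learn more,"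
--             "read https://docs.snowflake.com/en/sql-reference/name-resolution."
--         )
--     return database, schema, table
-- ===== SOURCE B (Python) =====
-- def _resolve_object_name(name):
--     parts = name.split(".")
--     num_dots = len(parts) - 1
--     if num_dots > 2:
--         raise ValueError(
--             "Expected schema object name to contain at most two dots ('.'),"
--             f"but got {num_dots}. Check that the provided name is valid. To learn more,"
--             "read https://docs.snowflake.com/en/sql-reference/name-resolution."
--         )
--     database, schema, table = [None] * (2 - num_dots) + parts
--     return database, schema, table
-- ===== Notes on version B (the rewrite author's own statement) =====
-- stated objective: simpler
-- what changed: B splits once and left-pads the parts list with None before a single positional unpack, replacing A's per-character dot-counting pass plus three separate split-and-unpack branches.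
import Mathlib
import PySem

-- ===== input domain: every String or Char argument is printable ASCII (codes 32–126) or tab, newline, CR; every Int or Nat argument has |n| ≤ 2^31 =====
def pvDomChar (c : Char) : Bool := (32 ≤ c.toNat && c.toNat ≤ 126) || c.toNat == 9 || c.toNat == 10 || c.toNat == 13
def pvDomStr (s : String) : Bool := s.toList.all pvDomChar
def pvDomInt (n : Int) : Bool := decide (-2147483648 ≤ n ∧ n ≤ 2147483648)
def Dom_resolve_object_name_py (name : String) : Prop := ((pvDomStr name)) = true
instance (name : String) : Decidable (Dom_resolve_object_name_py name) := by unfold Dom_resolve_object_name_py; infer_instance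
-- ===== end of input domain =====

-- B replaces A's dot-counting pass plus three split-and-unpack branches by one split
-- followed by left-padding with None and a single unpack (objective: simpler).
-- A raises ValueError when the name contains more than two dots; those inputs are outside Pre_.

-- ===== PORT A =====
def resolve_object_name_py (name : String) : Option String × Option String × String :=
  let num_dots : Int := (name.toList.map (fun c => if c == '.' then (1 : Int) else 0)).sum
  if num_dots = 0 then
    (none, none, name)
  else if num_dots = 1 then
    match (PySem.Chars.splitOn name.toList ['.']).map String.ofList with
    | [schema, table] => (none, some schema, table)
    | _ => (none, none, name)  -- unreachable: split on 1 dot yields exactly 2 parts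
  else if num_dots = 2 then
    match (PySem.Chars.splitOn name.toList ['.']).map String.ofList with
    | [database, schema, table] => (some database, some schema, table)
    | _ => (none, none, name)  -- unreachable: split on 2 dots yields exactly 3 parts
  else
    (none, none, name)  -- Python raises ValueError here (outside Pre_)

-- ===== PORT B =====
def resolve_object_name_py_alt (name : String) : Option String × Option String × String :=
  let parts := (PySem.Chars.splitOn name.toList ['.']).map String.ofList
  let num_dots : Int := (parts.length : Int) - 1
  if num_dots > 2 then
    (none, none, name)  -- Python raises ValueError here (outside Pre_)
  else
    -- 'database, schema, table = padded' unpacked positionally; the padded list always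
    -- has length 3 here, so the getD defaults are unreachable
    let padded := List.replicate (2 - num_dots).toNat (none : Option String) ++ parts.map some
    (padded.getD 0 none, padded.getD 1 none, (padded.getD 2 none).getD name)

-- ===== PRECONDITION & SPEC =====
-- Pre_ excludes exactly the names with more than two dots, on which A raises ValueError.
def Pre_resolve_object_name_py (name : String) : Prop :=
  name.toList.countP (fun c => c == '.') ≤ 2
instance (name : String) : Decidable (Pre_resolve_object_name_py name) := by
  unfold Pre_resolve_object_name_py; infer_instance
def pvWitness_resolve_object_name_py : String := "db.sch.tbl"

def Spec_resolve_object_name_py (name : String) (out : Option String × Option String × String) : Prop := out = resolve_object_name_py_alt name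
instance (name : String) (out : Option String × Option String × String) : Decidable (Spec_resolve_object_name_py name out) := by unfold Spec_resolve_object_name_py; infer_instance

-- ===== CLAIM (what is proved, stated in full; the proofs are below) =====
def Claim_equal_resolve_object_name_py : Prop := ∀ (name : String), Dom_resolve_object_name_py name → Pre_resolve_object_name_py name → Spec_resolve_object_name_py name (resolve_object_name_py name)

-- ===== LEMMAS AND PROOFS =====

-- splitOn with the single-char separator '.', fuel removed
def dotSplit (cur : List Char) : List Char → List (List Char)
  | [] => [cur.reverse]
  | c :: rest => if c = '.' then cur.reverse :: dotSplit [] rest else dotSplit (c :: cur) rest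

theorem splitOn_go_eq_dotSplit (fuel : Nat) (l cur : List Char) (acc : List (List Char))
    (h : l.length ≤ fuel) :
    PySem.Chars.splitOn.go ['.'] fuel l cur acc = acc.reverse ++ dotSplit cur l := by
  induction fuel generalizing l cur acc with
  | zero =>
    cases l with
    | nil => simp [PySem.Chars.splitOn.go, dotSplit]
    | cons c rest => simp at h
  | succ n ih =>
    cases l with
    | nil => simp [PySem.Chars.splitOn.go, dotSplit]
    | cons c rest =>
      by_cases hc : c = '.'
      · subst hc
        simp only [PySem.Chars.splitOn.go, List.isPrefixOf, BEq.rfl, Bool.true_and, if_pos,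
          dotSplit]
        rw [ih _ _ _ (by simpa using h)]
        simp
      · simp only [PySem.Chars.splitOn.go, List.isPrefixOf, dotSplit, if_neg hc]
        have hb : ¬ (('.' == c && true) = true) := by
          simp [beq_iff_eq]; intro h'; exact hc h'.symm
        rw [if_neg hb]
        exact ih _ _ _ (by simpa using Nat.le_of_succ_le_succ (by simpa using h))

theorem splitOn_eq_dotSplit (cs : List Char) :
    PySem.Chars.splitOn cs ['.'] = dotSplit [] cs := by
  have := splitOn_go_eq_dotSplit (cs.length + 1) cs [] [] (by omega)
  simpa [PySem.Chars.splitOn] using this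

theorem dotSplit_length (cs cur : List Char) :
    (dotSplit cur cs).length = cs.countP (fun c => c == '.') + 1 := by
  induction cs generalizing cur with
  | nil => simp [dotSplit]
  | cons c rest ih =>
    by_cases hc : c = '.'
    · subst hc; simp [dotSplit, ih]
    · simp [dotSplit, hc, ih]

theorem dotSplit_of_no_dot (cs cur : List Char)
    (h : cs.countP (fun c => c == '.') = 0) :
    dotSplit cur cs = [cur.reverse ++ cs] := by
  induction cs generalizing cur with
  | nil => simp [dotSplit]
  | cons c rest ih =>
    rw [List.countP_cons] at h
    have hc : ¬ c = '.' := by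
      intro hcc; subst hcc; simp at h
    have hcb : (c == '.') = false := by simpa [beq_iff_eq] using hc
    have hr : rest.countP (fun c => c == '.') = 0 := by
      simpa [hcb] using h
    simp [dotSplit, hc, ih _ hr]

theorem sum_map_dot_eq_countP (cs : List Char) :
    (cs.map (fun c => if c = '.' then (1 : Int) else 0)).sum
      = (cs.countP (fun c => c == '.') : Int) := by
  induction cs with
  | nil => simp
  | cons c rest ih =>
    by_cases hc : c = '.'
    · simp [hc, ih]; ring
    · simp [hc, ih]

-- ===== VERDICT (by name: the statement is the Claim_ definition above) =====
theorem resolve_object_name_py_spec : Claim_equal_resolve_object_name_py := by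
  intro name _ hpre
  unfold Spec_resolve_object_name_py
  unfold Pre_resolve_object_name_py at hpre
  unfold resolve_object_name_py resolve_object_name_py_alt
  set cs := name.toList with hcs
  set k := cs.countP (fun c => c == '.') with hk
  have hsum := sum_map_dot_eq_countP cs
  have hsplit := splitOn_eq_dotSplit cs
  have hlen := dotSplit_length cs []
  interval_cases k
  · -- no dot
    have h0 : dotSplit [] cs = [cs] := by
      have := dotSplit_of_no_dot cs [] (by omega)
      simpa using this
    have hmk : String.ofList cs = name := by rw [hcs]; exact String.ofList_toList
    simp [hsum, ← hk, hsplit, h0, hmk]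
  · -- one dot
    rw [← hk] at hlen
    obtain ⟨a, b, hab⟩ := List.length_eq_two.mp (by rw [hlen])
    simp [hsum, ← hk, hsplit, hab]
  · -- two dots
    rw [← hk] at hlen
    obtain ⟨a, b, c, habc⟩ := List.length_eq_three.mp (by rw [hlen])
    simp [hsum, ← hk, hsplit, habc]
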